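-- pv_equiv track=rewrite | github.com/Karna-Balaji-07/Python_2025 | Arrays/Subarrays/Subarray_product.py | product2
-- ===== SOURCE A (Python) =====
-- def product2(arr,element):
--     n = len(arr)
--     start = 0
--     prod = 1
--     for end in range(n):
--         prod *= arr[end]
--
--         while( start <= end and prod == 0 and element != 0):
--             start += 1
--             prod = 1
--             for i in range(start,end+1):
--                 prod*=arr[i]
--
--         while (start <= end and prod != 0 and abs(prod) > abs(element)):
--             prod //= arr[start]
--             start += 1
--         if prod == element:
--             return True
--     return False
-- ===== SOURCE B (Python) =====
-- def product2(arr, element):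
--     # element == 0: the window product hits 0 exactly when a zero enters it,
--     # and A reports True right then -- so the answer is plain membership.
--     if element == 0:
--         return 0 in arr
--     # Sliding window kept as a two-stack queue (oldest element at front[-1]);
--     # a zero resets the window in O(1) instead of A's re-multiplication loop.
--     front, back = [], []
--     prod = 1
--     for x in arr:
--         if x == 0:
--             if element == 1:   # the emptied window has product 1
--                 return True
--             front, back, prod = [], [], 1
--         else:
--             back.append(x)
--             prod *= x
--             while abs(prod) > abs(element):
--                 if not front:
--                     front = back[::-1]
--                     back = []
--                 prod //= front.pop()
--             if prod == element:
--                 return True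
--     return False
-- ===== Notes on version B (the rewrite author's own statement) =====
-- stated objective: alternative
-- what changed: B keeps the sliding window as a two-stack queue and resets it when a zero arrives instead of A's re-multiplication loop over the window after every zero, answers element==0 by a plain membership test, and recurses over the list instead of A's index-based loops.
import Mathlib
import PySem

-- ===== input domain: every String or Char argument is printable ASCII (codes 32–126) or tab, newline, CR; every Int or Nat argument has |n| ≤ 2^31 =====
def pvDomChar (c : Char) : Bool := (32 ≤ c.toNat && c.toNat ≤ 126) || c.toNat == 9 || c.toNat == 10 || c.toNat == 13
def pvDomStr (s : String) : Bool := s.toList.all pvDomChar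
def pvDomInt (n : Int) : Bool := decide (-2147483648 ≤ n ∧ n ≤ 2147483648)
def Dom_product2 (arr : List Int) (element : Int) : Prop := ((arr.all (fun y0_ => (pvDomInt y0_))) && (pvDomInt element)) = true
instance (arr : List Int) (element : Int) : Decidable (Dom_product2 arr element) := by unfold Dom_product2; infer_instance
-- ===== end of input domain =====

-- B keeps the sliding window as a two-stack queue, resets it at a zero instead of
-- A's re-multiplication of the whole window, and answers element == 0 by a membership
-- test; the return values are equal.

-- ===== PORT A =====
-- inner "for i in range(start, end+1): prod *= arr[i]" recompute
def aRecompute (arr : List Int) (s e : Nat) : Int :=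
  (List.range' s (e + 1 - s)).foldl (fun p i => p * arr.getD i 0) 1

-- "while start <= end and prod == 0 and element != 0: start += 1; prod = 1; for …"
def aZeroLoop (arr : List Int) (e : Nat) (element : Int) (start : Nat) (prod : Int) :
    Nat × Int :=
  if h : start ≤ e ∧ prod = 0 ∧ element ≠ 0 then
    aZeroLoop arr e element (start + 1) (aRecompute arr (start + 1) e)
  else (start, prod)
termination_by e + 1 - start
decreasing_by omega

-- "while start <= end and prod != 0 and abs(prod) > abs(element): prod //= arr[start]; start += 1"
def aShrinkLoop (arr : List Int) (e : Nat) (element : Int) (start : Nat) (prod : Int) :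
    Nat × Int :=
  if h : start ≤ e ∧ prod ≠ 0 ∧ |element| < |prod| then
    aShrinkLoop arr e element (start + 1) (PySem.Int.floordiv prod (arr.getD start 0))
  else (start, prod)
termination_by e + 1 - start
decreasing_by omega

-- one iteration of A's for-body: prod *= arr[end]; zero loop; shrink loop
def aStep (arr : List Int) (element : Int) (e start : Nat) (prod : Int) : Nat × Int :=
  let p1 := prod * arr.getD e 0
  let sp := aZeroLoop arr e element start p1
  aShrinkLoop arr e element sp.1 sp.2

-- "for end in range(n): … ; if prod == element: return True" / "return False"
def aLoop (arr : List Int) (element : Int) (e start : Nat) (prod : Int) : Bool :=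
  if h : e < arr.length then
    if (aStep arr element e start prod).2 = element then true
    else aLoop arr element (e + 1) (aStep arr element e start prod).1
           (aStep arr element e start prod).2
  else false
termination_by arr.length - e
decreasing_by omega

def product2 (arr : List Int) (element : Int) : Bool := aLoop arr element 0 0 1

-- ===== PORT B =====
-- "while abs(prod) > abs(element): if not front: front = back[::-1]; back = []; prod //= front.pop()"
-- `fr` holds Python's `front` REVERSED (oldest element first), so Python's front.pop() is
-- Lean's head and the flip `front = back[::-1]` is `fr := back`; exact step for step.
-- The [],[] case is Python's unreachable pop-from-empty (there prod = 1, the guard is false).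
def bShrink (element : Int) (fr back : List Int) (prod : Int) : List Int × List Int × Int :=
  match fr, back with
  | [], [] => ([], [], prod)
  | [], b :: bs =>
    if |element| < |prod| then bShrink element bs [] (PySem.Int.floordiv prod b)
    else ([], b :: bs, prod)
  | f :: fs, bk =>
    if |element| < |prod| then bShrink element fs bk (PySem.Int.floordiv prod f)
    else (f :: fs, bk, prod)
termination_by fr.length + back.length
decreasing_by all_goals (simp only [List.length_cons, List.length_nil]; omega)

-- "for x in arr: if x == 0: … else: back.append(x); prod *= x; <shrink>; if prod == element: …"
def bLoop (element : Int) : List Int → List Int → List Int → Int → Bool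
  | [], _, _, _ => false
  | x :: rest, fr, back, prod =>
    if x = 0 then
      if element = 1 then true else bLoop element rest [] [] 1
    else
      let r := bShrink element fr (back ++ [x]) (prod * x)
      if r.2.2 = element then true else bLoop element rest r.1 r.2.1 r.2.2

-- "if element == 0: return 0 in arr"
def product2_alt (arr : List Int) (element : Int) : Bool :=
  if element = 0 then arr.contains 0 else bLoop element arr [] [] 1

-- ===== PRECONDITION & SPEC =====
def Spec_product2 (arr : List Int) (element : Int) (out : Bool) : Prop := out = product2_alt arr element
instance (arr : List Int) (element : Int) (out : Bool) : Decidable (Spec_product2 arr element out) := by unfold Spec_product2; infer_instance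

-- ===== CLAIM (what is proved, stated in full; the proofs are below) =====
def Claim_equal_product2 : Prop := ∀ (arr : List Int) (element : Int), Dom_product2 arr element → Spec_product2 arr element (product2 arr element)

-- ===== LEMMAS AND PROOFS =====

-- product of arr[s..e-1], the running-window invariant value
def prodIdx (arr : List Int) (s e : Nat) : Int :=
  (List.range' s (e - s)).foldl (fun p i => p * arr.getD i 0) 1

-- the window slice arr[s..t-1] as a list (B's queue contents fr ++ back)
def winSlice (arr : List Int) (s t : Nat) : List Int :=
  (List.range' s (t - s)).map (fun i => arr.getD i 0)

theorem foldl_mul_init (g : Nat → Int) : ∀ (l : List Nat) (a : Int),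
    l.foldl (fun p i => p * g i) a = a * l.foldl (fun p i => p * g i) 1
  | [], a => by simp
  | i :: l, a => by
    simp only [List.foldl_cons]
    rw [foldl_mul_init g l (a * g i), foldl_mul_init g l (1 * g i)]
    ring

theorem prodIdx_self (arr : List Int) (s : Nat) : prodIdx arr s s = 1 := by
  simp [prodIdx]

theorem prodIdx_concat (arr : List Int) {s e : Nat} (h : s ≤ e) :
    prodIdx arr s (e + 1) = prodIdx arr s e * arr.getD e 0 := by
  have h1 : e + 1 - s = (e - s) + 1 := by omega
  have h2 : s + 1 * (e - s) = e := by omega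
  simp only [prodIdx, h1, List.range'_concat, List.foldl_append, List.foldl_cons,
    List.foldl_nil, h2]

theorem prodIdx_head (arr : List Int) {s e : Nat} (h : s < e) :
    prodIdx arr s e = arr.getD s 0 * prodIdx arr (s + 1) e := by
  have h1 : e - s = (e - (s + 1)) + 1 := by omega
  simp only [prodIdx, h1, List.range'_succ, List.foldl_cons]
  rw [foldl_mul_init]
  ring

theorem prodIdx_ne_zero (arr : List Int) :
    ∀ (n s e : Nat), e - s = n → (∀ i, s ≤ i → i < e → arr.getD i 0 ≠ 0) →
    prodIdx arr s e ≠ 0 := by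
  intro n
  induction n with
  | zero =>
    intro s e h _
    have h0 : e - s = 0 := h
    have h1 : prodIdx arr s e = 1 := by simp [prodIdx, h0]
    simp [h1]
  | succ k ih =>
    intro s e h hz
    have hlt : s < e := by omega
    rw [prodIdx_head arr hlt]
    exact mul_ne_zero (hz s le_rfl hlt)
      (ih (s + 1) e (by omega) (fun i h1 h2 => hz i (by omega) h2))

theorem fdiv_cancel (x p : Int) (h : x ≠ 0) : PySem.Int.floordiv (x * p) x = p := by
  unfold PySem.Int.floordiv
  exact Int.mul_fdiv_cancel_left p h

theorem winSlice_self (arr : List Int) (s : Nat) : winSlice arr s s = [] := by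
  simp [winSlice]

theorem winSlice_cons (arr : List Int) {s t : Nat} (h : s < t) :
    winSlice arr s t = arr.getD s 0 :: winSlice arr (s + 1) t := by
  have h1 : t - s = (t - (s + 1)) + 1 := by omega
  simp only [winSlice, h1, List.range'_succ, List.map_cons]

theorem winSlice_concat (arr : List Int) {s t : Nat} (h : s ≤ t) :
    winSlice arr s (t + 1) = winSlice arr s t ++ [arr.getD t 0] := by
  have h1 : t + 1 - s = (t - s) + 1 := by omega
  have h2 : s + 1 * (t - s) = t := by omega
  simp only [winSlice, h1, List.range'_concat, List.map_append, List.map_cons,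
    List.map_nil, h2]

-- the zero-removal loop always ends by emptying the window: (e+1, 1)
theorem aZeroLoop_eq (arr : List Int) (e : Nat) (element : Int)
    (hz : arr.getD e 0 = 0) (hel : element ≠ 0) :
    ∀ (n start : Nat), e - start = n → start ≤ e →
    aZeroLoop arr e element start 0 = (e + 1, 1) := by
  intro n
  induction n with
  | zero =>
    intro start h hle
    have hse : start = e := by omega
    have hcond : start ≤ e ∧ (0 : Int) = 0 ∧ element ≠ 0 := ⟨hle, rfl, hel⟩
    rw [aZeroLoop, dif_pos hcond]
    have hrec : aRecompute arr (start + 1) e = 1 := by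
      simp [aRecompute, hse]
    have hcond2 : ¬ (start + 1 ≤ e ∧ (1 : Int) = 0 ∧ element ≠ 0) := by
      intro hc; omega
    rw [hrec, aZeroLoop, dif_neg hcond2, hse]
  | succ k ih =>
    intro start h hle
    have hcond : start ≤ e ∧ (0 : Int) = 0 ∧ element ≠ 0 := ⟨hle, rfl, hel⟩
    rw [aZeroLoop, dif_pos hcond]
    have hlt : start + 1 ≤ e := by omega
    have hrec : aRecompute arr (start + 1) e = 0 := by
      have hr : aRecompute arr (start + 1) e = prodIdx arr (start + 1) (e + 1) := rfl
      rw [hr, prodIdx_concat arr hlt, hz, mul_zero]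
    rw [hrec]
    exact ih (start + 1) (by omega) hlt

-- with element = 0, A's shrink loop drains the (zero-free) window completely
theorem aShrink_full (arr : List Int) (e : Nat) :
    ∀ (n start : Nat) (prod : Int), e + 1 - start = n → start ≤ e + 1 →
    prod = prodIdx arr start (e + 1) →
    (∀ i, start ≤ i → i ≤ e → arr.getD i 0 ≠ 0) →
    aShrinkLoop arr e 0 start prod = (e + 1, 1) := by
  intro n
  induction n with
  | zero =>
    intro start prod h hle hprod hz
    have hse : start = e + 1 := by omega
    have hcond : ¬ (start ≤ e ∧ prod ≠ 0 ∧ |(0 : Int)| < |prod|) := by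
      intro hc; omega
    rw [aShrinkLoop, dif_neg hcond, hprod, hse, prodIdx_self]
  | succ k ih =>
    intro start prod h hle hprod hz
    have hse : start ≤ e := by omega
    have hne : prod ≠ 0 := by
      rw [hprod]
      exact prodIdx_ne_zero arr (e + 1 - start) start (e + 1) rfl
        (fun i h1 h2 => hz i h1 (by omega))
    have habs : |(0 : Int)| < |prod| := by
      simpa using abs_pos.mpr hne
    have hcond : start ≤ e ∧ prod ≠ 0 ∧ |(0 : Int)| < |prod| := ⟨hse, hne, habs⟩
    rw [aShrinkLoop, dif_pos hcond]
    have hstep : PySem.Int.floordiv prod (arr.getD start 0) = prodIdx arr (start + 1) (e + 1) := by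
      rw [hprod, prodIdx_head arr (by omega : start < e + 1)]
      exact fdiv_cancel _ _ (hz start le_rfl hse)
    rw [hstep]
    exact ih (start + 1) _ (by omega) (by omega) rfl (fun i h1 h2 => hz i (by omega) h2)

-- A's shrink loop and B's queue-shrink loop produce the same product and matching windows
theorem shrink_corr (arr : List Int) (element : Int) (hel : element ≠ 0) (t : Nat) (ht : 1 ≤ t) :
    ∀ (n s : Nat) (fr back : List Int) (prod : Int), t - s = n → s ≤ t →
    fr ++ back = winSlice arr s t → prod = prodIdx arr s t →
    (∀ i, s ≤ i → i < t → arr.getD i 0 ≠ 0) →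
    ∃ s' fr' back', s ≤ s' ∧ s' ≤ t ∧
      aShrinkLoop arr (t - 1) element s prod = (s', prodIdx arr s' t) ∧
      bShrink element fr back prod = (fr', back', prodIdx arr s' t) ∧
      fr' ++ back' = winSlice arr s' t := by
  intro n
  induction n with
  | zero =>
    intro s fr back prod h hle hwin hprod hz
    have hst : s = t := by omega
    have hnil : fr ++ back = [] := by rw [hwin, hst, winSlice_self]
    have hfr : fr = [] := List.eq_nil_of_append_eq_nil hnil |>.1
    have hbk : back = [] := List.eq_nil_of_append_eq_nil hnil |>.2
    have hp1 : prod = 1 := by rw [hprod, hst, prodIdx_self]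
    have hcondA : ¬ (s ≤ t - 1 ∧ prod ≠ 0 ∧ |element| < |prod|) := by
      intro hc
      have : |element| < 1 := by rw [← abs_one, ← hp1]; exact hc.2.2
      have : element = 0 := by omega
      exact hel this
    refine ⟨s, [], [], le_rfl, hle, ?_, ?_, by simp [hst, winSlice_self]⟩
    · rw [aShrinkLoop, dif_neg hcondA, hprod, hst]
    · rw [hfr, hbk, bShrink, hprod, hst]
  | succ k ih =>
    intro s fr back prod h hle hwin hprod hz
    have hst : s < t := by omega
    have hne : prod ≠ 0 := by
      rw [hprod]
      exact prodIdx_ne_zero arr (t - s) s t rfl hz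
    have hhead : fr ++ back = arr.getD s 0 :: winSlice arr (s + 1) t := by
      rw [hwin, winSlice_cons arr hst]
    by_cases habs : |element| < |prod|
    · -- one pop on each side
      have hcondA : s ≤ t - 1 ∧ prod ≠ 0 ∧ |element| < |prod| := ⟨by omega, hne, habs⟩
      have hdiv : PySem.Int.floordiv prod (arr.getD s 0) = prodIdx arr (s + 1) t := by
        rw [hprod, prodIdx_head arr hst]
        exact fdiv_cancel _ _ (hz s le_rfl hst)
      cases hfr : fr with
      | nil =>
        cases hbk : back with
        | nil => rw [hfr, hbk] at hhead; simp at hhead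
        | cons b bs =>
          rw [hfr, hbk] at hhead
          simp only [List.nil_append] at hhead
          have hb : b = arr.getD s 0 := (List.cons.injEq _ _ _ _ ▸ hhead).1
          have hbs : bs = winSlice arr (s + 1) t := (List.cons.injEq _ _ _ _ ▸ hhead).2
          obtain ⟨s', fr', back', h1, h2, h3, h4, h5⟩ :=
            ih (s + 1) bs [] (PySem.Int.floordiv prod b) (by omega) (by omega)
              (by rw [List.append_nil, hbs]) (by rw [hb, hdiv])
              (fun i hi1 hi2 => hz i (by omega) hi2)
          refine ⟨s', fr', back', by omega, h2, ?_, ?_, h5⟩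
          · rw [aShrinkLoop, dif_pos hcondA]
            rw [hb] at h3
            exact h3
          · rw [bShrink, if_pos habs]
            exact h4
      | cons f fs =>
        rw [hfr] at hhead
        simp only [List.cons_append] at hhead
        have hf : f = arr.getD s 0 := (List.cons.injEq _ _ _ _ ▸ hhead).1
        have hfs : fs ++ back = winSlice arr (s + 1) t := (List.cons.injEq _ _ _ _ ▸ hhead).2
        obtain ⟨s', fr', back', h1, h2, h3, h4, h5⟩ :=
          ih (s + 1) fs back (PySem.Int.floordiv prod f) (by omega) (by omega)
            hfs (by rw [hf, hdiv]) (fun i hi1 hi2 => hz i (by omega) hi2)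
        refine ⟨s', fr', back', by omega, h2, ?_, ?_, h5⟩
        · rw [aShrinkLoop, dif_pos hcondA]
          rw [hf] at h3
          exact h3
        · rw [bShrink, if_pos habs]
          exact h4
    · -- both stop here
      have hcondA : ¬ (s ≤ t - 1 ∧ prod ≠ 0 ∧ |element| < |prod|) := by
        intro hc; exact habs hc.2.2
      refine ⟨s, fr, back, le_rfl, hle, ?_, ?_, hwin⟩
      · rw [aShrinkLoop, dif_neg hcondA, hprod]
      · cases hfr : fr with
        | nil =>
          cases hbk : back with
          | nil => rw [hfr, hbk] at hhead; simp at hhead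
          | cons b bs => rw [bShrink, if_neg habs, hprod]
        | cons f fs => rw [bShrink, if_neg habs, hprod]

-- main loop equivalence for element ≠ 0
theorem loop_corr (arr : List Int) (element : Int) (hel : element ≠ 0) :
    ∀ (rest : List Int) (e s : Nat) (fr back : List Int), rest = arr.drop e → s ≤ e →
    fr ++ back = winSlice arr s e →
    (∀ i, s ≤ i → i < e → arr.getD i 0 ≠ 0) →
    aLoop arr element e s (prodIdx arr s e) = bLoop element rest fr back (prodIdx arr s e) := by
  intro rest
  induction rest with
  | nil =>
    intro e s fr back hrest hle hwin hz
    have hge : ¬ (e < arr.length) := by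
      have := (List.drop_eq_nil_iff).mp hrest.symm
      omega
    rw [aLoop, dif_neg hge, bLoop]
  | cons x rest' ih =>
    intro e s fr back hrest hle hwin hz
    have hlen : e < arr.length := by
      by_contra hc
      have : arr.drop e = [] := List.drop_eq_nil_iff.mpr (by omega)
      rw [← hrest] at this
      exact List.cons_ne_nil x rest' this
    have hx : arr.getD e 0 = x := by
      have h0 : (arr.drop e).getD 0 0 = x := by rw [← hrest]; rfl
      rw [List.getD_eq_getElem _ _ hlen, ← h0,
        List.getD_eq_getElem _ _ (by simp [List.length_drop]; omega)]
      simp [List.getElem_drop]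
    have hrest' : rest' = arr.drop (e + 1) := by
      have : arr.drop (e + 1) = (arr.drop e).drop 1 := by
        rw [List.drop_drop]
      rw [this, ← hrest, List.drop_one, List.tail_cons]
    rw [aLoop, dif_pos hlen, bLoop]
    by_cases hx0 : x = 0
    · -- zero: A empties the window via the re-multiplication loop; B resets it
      have hstep : aStep arr element e s (prodIdx arr s e) = (e + 1, 1) := by
        have hp1 : prodIdx arr s e * arr.getD e 0 = 0 := by rw [hx, hx0, mul_zero]
        have hshr : ¬ ((e + 1 : Nat) ≤ e ∧ (1 : Int) ≠ 0 ∧ |element| < |(1 : Int)|) := by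
          intro hc; omega
        simp only [aStep]
        rw [hp1, aZeroLoop_eq arr e element (by rw [hx, hx0]) hel (e - s) s rfl hle]
        show aShrinkLoop arr e element (e + 1) 1 = (e + 1, 1)
        rw [aShrinkLoop, dif_neg hshr]
      rw [hstep, if_pos hx0]
      show (if (1 : Int) = element then true else aLoop arr element (e + 1) (e + 1) 1) =
           (if element = 1 then true else bLoop element rest' [] [] 1)
      by_cases hc : element = 1
      · rw [if_pos hc.symm, if_pos hc]
      · rw [if_neg (fun h => hc h.symm), if_neg hc]
        have := ih (e + 1) (e + 1) [] [] hrest' le_rfl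
          (by rw [List.append_nil, winSlice_self]) (by omega)
        rw [prodIdx_self] at this
        exact this
    · -- nonzero: both multiply x in and run their shrink loops in lock step
      have hle1 : s ≤ e + 1 := by omega
      have hz1 : ∀ i, s ≤ i → i < e + 1 → arr.getD i 0 ≠ 0 := by
        intro i h1 h2
        rcases Nat.lt_or_ge i e with hi | hi
        · exact hz i h1 hi
        · have : i = e := by omega
          rw [this, hx]; exact hx0
      have hp1 : prodIdx arr s e * x = prodIdx arr s (e + 1) := by
        rw [← hx, ← prodIdx_concat arr hle]
      have hne : prodIdx arr s (e + 1) ≠ 0 :=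
        prodIdx_ne_zero arr (e + 1 - s) s (e + 1) rfl hz1
      obtain ⟨s', fr', back', h1, h2, h3, h4, h5⟩ :=
        shrink_corr arr element hel (e + 1) (by omega) (e + 1 - s) s fr (back ++ [x])
          (prodIdx arr s (e + 1)) rfl hle1
          (by rw [← List.append_assoc, hwin, ← hx, ← winSlice_concat arr hle])
          rfl hz1
      have hAstep : aStep arr element e s (prodIdx arr s e) = (s', prodIdx arr s' (e + 1)) := by
        have hcz : ¬ (s ≤ e ∧ prodIdx arr s e * arr.getD e 0 = 0 ∧ element ≠ 0) := by
          intro hc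
          rw [hx, hp1] at hc
          exact hne hc.2.1
        simp only [aStep]
        rw [aZeroLoop, dif_neg hcz]
        show aShrinkLoop arr e element s (prodIdx arr s e * arr.getD e 0) = _
        rw [hx, hp1]
        exact h3
      have hBstep : bShrink element fr (back ++ [x]) (prodIdx arr s e * x) =
          (fr', back', prodIdx arr s' (e + 1)) := by
        rw [hp1]; exact h4
      rw [hAstep, if_neg hx0]
      show (if prodIdx arr s' (e + 1) = element then true
            else aLoop arr element (e + 1) s' (prodIdx arr s' (e + 1))) = _
      simp only [hBstep]
      show _ = (if prodIdx arr s' (e + 1) = element then true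
            else bLoop element rest' fr' back' (prodIdx arr s' (e + 1)))
      by_cases hc : prodIdx arr s' (e + 1) = element
      · rw [if_pos hc, if_pos hc]
      · rw [if_neg hc, if_neg hc]
        exact ih (e + 1) s' fr' back' hrest' h2 h5
          (fun i hi1 hi2 => hz1 i (by omega) hi2)

-- main loop characterisation for element = 0: True iff a zero lies at index ≥ e
theorem loop_zero (arr : List Int) :
    ∀ (n e start : Nat) (prod : Int), arr.length - e = n → start ≤ e →
    prod = prodIdx arr start e →
    (∀ i, start ≤ i → i < e → arr.getD i 0 ≠ 0) →
    (aLoop arr 0 e start prod = true ↔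
      ∃ i, e ≤ i ∧ i < arr.length ∧ arr.getD i 0 = 0) := by
  intro n
  induction n with
  | zero =>
    intro e start prod h hle hprod hz
    have hge : ¬ (e < arr.length) := by omega
    rw [aLoop, dif_neg hge]
    constructor
    · intro hc; exact absurd hc (by simp)
    · rintro ⟨i, h1, h2, _⟩; omega
  | succ k ih =>
    intro e start prod h hle hprod hz
    have hlt : e < arr.length := by omega
    by_cases hx : arr.getD e 0 = 0
    · have hA : aStep arr 0 e start prod = (start, 0) := by
        have hp1 : prod * arr.getD e 0 = 0 := by rw [hx, mul_zero]
        have hcz : ¬ (start ≤ e ∧ (0 : Int) = 0 ∧ (0 : Int) ≠ 0) := by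
          intro hc; exact hc.2.2 rfl
        have hcs : ¬ (start ≤ e ∧ (0 : Int) ≠ 0 ∧ |(0 : Int)| < |(0 : Int)|) := by
          intro hc; exact hc.2.1 rfl
        simp only [aStep]
        rw [hp1, aZeroLoop, dif_neg hcz]
        show aShrinkLoop arr e 0 start 0 = (start, 0)
        rw [aShrinkLoop, dif_neg hcs]
      rw [aLoop, dif_pos hlt, hA]
      show (if (0 : Int) = 0 then true else aLoop arr 0 (e + 1) start 0) = true ↔ _
      rw [if_pos rfl]
      simp only [true_iff]
      exact ⟨e, le_rfl, hlt, hx⟩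
    · have hp1 : prod * arr.getD e 0 = prodIdx arr start (e + 1) := by
        rw [hprod, prodIdx_concat arr hle]
      have hzz : ∀ i, start ≤ i → i ≤ e → arr.getD i 0 ≠ 0 := by
        intro i h1 h2
        rcases Nat.lt_or_ge i e with hi | hi
        · exact hz i h1 hi
        · have hie : i = e := by omega
          rw [hie]; exact hx
      have hne : prod * arr.getD e 0 ≠ 0 := by
        rw [hp1]
        exact prodIdx_ne_zero arr (e + 1 - start) start (e + 1) rfl
          (fun i h1 h2 => hzz i h1 (by omega))
      have hA : aStep arr 0 e start prod = (e + 1, 1) := by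
        have hcz : ¬ (start ≤ e ∧ prod * arr.getD e 0 = 0 ∧ (0 : Int) ≠ 0) := by
          intro hc; exact hne hc.2.1
        simp only [aStep]
        rw [aZeroLoop, dif_neg hcz]
        exact aShrink_full arr e (e + 1 - start) start (prod * arr.getD e 0) rfl
          (by omega) hp1 hzz
      rw [aLoop, dif_pos hlt, hA]
      show (if (1 : Int) = 0 then true else aLoop arr 0 (e + 1) (e + 1) 1) = true ↔ _
      rw [if_neg (by norm_num : ¬ ((1 : Int) = 0))]
      rw [ih (e + 1) (e + 1) 1 (by omega) le_rfl (by rw [prodIdx_self]) (by omega)]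
      constructor
      · rintro ⟨i, h1, h2, h3⟩; exact ⟨i, by omega, h2, h3⟩
      · rintro ⟨i, h1, h2, h3⟩
        rcases Nat.lt_or_ge e i with hi | hi
        · exact ⟨i, by omega, h2, h3⟩
        · have hie : i = e := by omega
          rw [hie] at h3
          exact absurd h3 hx

theorem contains_iff_exists (arr : List Int) :
    arr.contains 0 = true ↔ ∃ i, i < arr.length ∧ arr.getD i 0 = 0 := by
  simp only [List.contains_iff_mem, List.mem_iff_getElem]
  constructor
  · rintro ⟨i, hi, hv⟩
    exact ⟨i, hi, by rw [List.getD_eq_getElem arr 0 hi, hv]⟩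
  · rintro ⟨i, hi, hv⟩
    exact ⟨i, hi, by rw [← List.getD_eq_getElem arr 0 hi, hv]⟩

-- ===== VERDICT (by name: the statement is the Claim_ definition above) =====
theorem product2_spec : Claim_equal_product2 := by
  intro arr element _
  unfold Spec_product2 product2 product2_alt
  by_cases hel : element = 0
  · subst hel
    rw [if_pos rfl]
    have h1 := loop_zero arr (arr.length - 0) 0 0 1 rfl le_rfl (by rw [prodIdx_self]) (by omega)
    have h2 := contains_iff_exists arr
    cases hA : aLoop arr 0 0 0 1 <;> cases hB : arr.contains 0
    · rfl
    · exfalso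
      obtain ⟨i, hi, hv⟩ := h2.mp hB
      have hc := h1.mpr ⟨i, Nat.zero_le i, hi, hv⟩
      rw [hA] at hc; exact Bool.false_ne_true hc
    · exfalso
      obtain ⟨i, _, hi, hv⟩ := h1.mp hA
      have hc := h2.mpr ⟨i, hi, hv⟩
      rw [hB] at hc; exact Bool.false_ne_true hc
    · rfl
  · rw [if_neg hel]
    have := loop_corr arr element hel arr 0 0 [] [] (by simp) le_rfl
      (by rw [List.append_nil, winSlice_self]) (by omega)
    rw [prodIdx_self] at this
    exact this
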